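-- pv_equiv track=rewrite | github.com/ahadaso042/CPS109Labs | labs109.py | candy_share
-- ===== SOURCE A (Python) =====
-- def candy_share(candies):
--     def stop(l):
--         for i in l:
--             if i >= 2:
--                 return False
--         return True
--
--     n = len(candies)
--     c = 0
--     while True:
--         if stop(candies):
--             return c
--         c += 1
--         new_candies = [0] * n
--         for i in range(n):
--             if candies[i] >= 2:
--                 candies[i] -= 2
--                 if i == n - 1:
--                     new_candies[i - 1] += 1
--                     new_candies[0] += 1
--                 else:
--                     new_candies[i - 1] += 1
--                     new_candies[i + 1] += 1
--             new_candies[i] += candies[i]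
--         candies = new_candies
-- ===== SOURCE B (Python) =====
-- def candy_share(candies):
--     # Sparse worklist simulation: keep the set of "active" children (>= 2 candies) and,
--     # each round, touch only active positions and their two neighbours instead of
--     # rescanning and rebuilding the whole list; a round ends by recomputing the active
--     # set from the touched positions alone (untouched children stayed below 2).
--     # NOTE: B mutates the caller's list in place every round (A mutates it only during
--     # the first round); equivalence is about the return value.
--     n = len(candies)
--     active = {i for i in range(n) if candies[i] >= 2}
--     rounds = 0
--     while active:
--         rounds += 1
--         for i in active:
--             candies[i] -= 2
--         for i in active:
--             candies[(i - 1) % n] += 1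
--             candies[(i + 1) % n] += 1
--         touched = set()
--         for i in active:
--             touched.add(i)
--             touched.add((i - 1) % n)
--             touched.add((i + 1) % n)
--         active = {j for j in touched if candies[j] >= 2}
--     return rounds
-- ===== Notes on version B (the rewrite author's own statement) =====
-- stated objective: alternative
-- what changed: A rescans and rebuilds the whole list every round (dense scatter into a fresh zero list with a special-cased last index); B is a sparse worklist simulation: it maintains the set of active children (>=2), applies the -2/+1/+1 deltas in place only at active positions and their cyclic neighbours, and recomputes the active set from the touched positions alone, stopping when the worklist is empty; B mutates the caller's list every round (A only during the first).
import Mathlib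
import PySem

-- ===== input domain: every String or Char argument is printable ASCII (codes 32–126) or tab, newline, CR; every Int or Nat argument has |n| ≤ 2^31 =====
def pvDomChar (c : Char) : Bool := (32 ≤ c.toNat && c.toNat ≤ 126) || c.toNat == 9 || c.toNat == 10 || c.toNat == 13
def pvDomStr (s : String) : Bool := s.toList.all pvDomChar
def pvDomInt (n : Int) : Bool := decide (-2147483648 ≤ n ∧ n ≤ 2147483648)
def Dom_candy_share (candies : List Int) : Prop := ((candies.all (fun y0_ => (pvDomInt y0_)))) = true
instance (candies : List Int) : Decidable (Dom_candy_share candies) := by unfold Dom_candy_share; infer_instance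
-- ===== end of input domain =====

-- B replaces A's dense per-round rebuild (scatter into a fresh zero list) by a sparse worklist:
-- a set of active indices, in-place deltas at active positions and their neighbours only.
-- A mutates the caller's list during the first round, B every round — equivalence is about the return value.

-- ===== PORT A =====
-- A's inner helper `stop(l)`
def candyStop : List Int → Bool
  | [] => true
  | x :: xs => if x ≥ 2 then false else candyStop xs

-- `l[i] += v` with Python indexing (negative i counts from the end)
def candyInc (l : List Int) (i v : Int) : List Int :=
  PySem.List.pySetD l i (PySem.List.pyGetD l i 0 + v)

-- the body of A's `for i in range(n)` loop; state = (candies, new_candies)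
def candyStepA (n : Int) (s : List Int × List Int) (i : Int) : List Int × List Int :=
  if PySem.List.pyGetD s.1 i 0 ≥ 2 then
    let cand := PySem.List.pySetD s.1 i (PySem.List.pyGetD s.1 i 0 - 2)
    let nc :=
      if i = n - 1 then candyInc (candyInc s.2 (i - 1) 1) 0 1
      else candyInc (candyInc s.2 (i - 1) 1) (i + 1) 1
    (cand, candyInc nc i (PySem.List.pyGetD cand i 0))
  else (s.1, candyInc s.2 i (PySem.List.pyGetD s.1 i 0))

-- one iteration of A's `while True` body after the `stop` test
def candyRoundA (cand : List Int) : List Int :=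
  ((PySem.List.pyRange 0 cand.length 1).foldl (candyStepA cand.length)
    (cand, List.replicate cand.length 0)).2

def candyLoopA : Nat → List Int → Int → Int
  | 0, _, c => c
  | fuel + 1, cand, c =>
    if candyStop cand then c else candyLoopA fuel (candyRoundA cand) (c + 1)

-- fuel: totality guard only (the Python loop may run forever, e.g. on [2,0]); whenever the Python
-- loop halts it does so well within (S+n+3)^2 rounds (S = sum of absolute values), and the loop
-- exits as soon as `stop` holds, so the guard is never what determines the result of a halting run
def candyFuel (candies : List Int) : Nat :=
  let s := candies.foldl (fun a x => a + x.natAbs) 0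
  (s + candies.length + 3) * (s + candies.length + 3)

def candy_share (candies : List Int) : Int :=
  candyLoopA (candyFuel candies) candies 0

-- ===== PORT B =====
-- `{i for i in range(n) if candies[i] >= 2}`
def bInitActive (cand : List Int) (n : Int) : List Int :=
  PySem.Set.ofList ((PySem.List.pyRange 0 n 1).filter
    (fun i => decide (PySem.List.pyGetD cand i 0 ≥ 2)))

-- `for i in active: candies[i] -= 2`
def bGive (cand : List Int) (active : List Int) : List Int :=
  active.foldl (fun c i => PySem.List.pySetD c i (PySem.List.pyGetD c i 0 - 2)) cand

-- `for i in active: candies[(i-1)%n] += 1; candies[(i+1)%n] += 1`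
def bRecv (n : Int) (cand : List Int) (active : List Int) : List Int :=
  active.foldl (fun c i =>
    candyInc (candyInc c (PySem.Int.mod (i - 1) n) 1) (PySem.Int.mod (i + 1) n) 1) cand

-- `touched = set(); for i in active: touched.add(i); touched.add((i-1)%n); touched.add((i+1)%n)`
def bTouched (n : Int) (active : List Int) : List Int :=
  active.foldl (fun t i =>
    PySem.Set.add (PySem.Set.add (PySem.Set.add t i) (PySem.Int.mod (i - 1) n))
      (PySem.Int.mod (i + 1) n)) PySem.Set.empty

def bLoop (n : Int) : Nat → List Int → List Int → Int → Int
  | 0, _, _, r => r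
  | fuel + 1, cand, active, r =>
    if active.isEmpty then r
    else
      let c1 := bGive cand active
      let c2 := bRecv n c1 active
      let touched := bTouched n active
      let active' := PySem.Set.ofList
        (touched.filter (fun j => decide (PySem.List.pyGetD c2 j 0 ≥ 2)))
      bLoop n fuel c2 active' (r + 1)

-- same totality fuel as A's port (comment above candyFuel applies)
def candy_share_alt (candies : List Int) : Int :=
  bLoop (candies.length : Int) (candyFuel candies) candies
    (bInitActive candies (candies.length : Int)) 0

-- ===== PRECONDITION & SPEC =====
def Spec_candy_share (candies : List Int) (out : Int) : Prop := out = candy_share_alt candies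
instance (candies : List Int) (out : Int) : Decidable (Spec_candy_share candies out) := by
  unfold Spec_candy_share; infer_instance

-- ===== CLAIM (what is proved, stated in full; the proofs are below) =====
def Claim_equal_candy_share : Prop := ∀ (candies : List Int), Dom_candy_share candies →
  Spec_candy_share candies (candy_share candies)

-- ===== LEMMAS AND PROOFS =====

-- value of position j, the 0/1 gift flag, and the post-giving remainder
def cVal (cand : List Int) (j : Nat) : Int := cand.getD j 0
def gVal (cand : List Int) (j : Nat) : Int := if cVal cand j ≥ 2 then 1 else 0
def cRem (cand : List Int) (j : Nat) : Int := cVal cand j - 2 * gVal cand j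

-- the two cyclic neighbour positions (q1 = python index (i-1)%n, q2 = (i+1)%n)
def q1 (n j : Nat) : Nat := if j = 0 then n - 1 else j - 1
def q2 (n j : Nat) : Nat := if j = n - 1 then 0 else j + 1

-- gifts received at j from the senders 0,…,k-1 (A's scatter)
def sVal (cand : List Int) (n k j : Nat) : Int :=
  ∑ i ∈ Finset.range k,
    ((if q1 n i = j then gVal cand i else 0) + (if q2 n i = j then gVal cand i else 0))

theorem self_map (xs : List Int) : (List.range xs.length).map (fun j => xs.getD j 0) = xs := by
  apply List.ext_getElem
  · simp
  · intro i h1 h2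
    simp [List.getD_eq_getElem?_getD, List.getElem?_eq_getElem h2]

theorem mget {n : Nat} (f : Nat → Int) (e : Int) (k : Nat) (hk : k < n)
    (he : e = (k : Int) ∨ e = (k : Int) - n) :
    PySem.List.pyGetD ((List.range n).map f) e 0 = f k := by
  rcases he with rfl | rfl
  · rw [PySem.List.pyGetD_natCast]
    exact PySem.List.getD_map_range f n k 0 hk
  · rw [show (k : Int) - n = -(((n - k : Nat) : Int)) by omega,
        PySem.List.pyGetD_neg_natCast _ _ _ (by omega) (by simp only [List.length_map, List.length_range]; omega)]
    simp only [List.length_map, List.length_range, List.getElem_map, List.getElem_range]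
    congr 1
    omega

theorem mset {n : Nat} (f : Nat → Int) (e : Int) (k : Nat) (v : Int) (hk : k < n)
    (he : e = (k : Int) ∨ e = (k : Int) - n) :
    PySem.List.pySetD ((List.range n).map f) e v
      = (List.range n).map (fun j => if j = k then v else f j) := by
  have hset : ∀ m, m < n → ((List.range n).map f).set m v
      = (List.range n).map (fun j => if j = m then v else f j) := by
    intro m hm
    apply List.ext_getElem
    · simp
    · intro i h1 h2
      simp only [List.getElem_set, List.getElem_map, List.getElem_range]
      simp only [List.length_set, List.length_map, List.length_range] at h1
      by_cases h : i = m
      · simp [h]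
      · simp [h, Ne.symm h]
  rcases he with rfl | rfl
  · rw [PySem.List.pySetD_natCast]
    exact hset k hk
  · rw [show (k : Int) - n = -(((n - k : Nat) : Int)) by omega]
    rw [show PySem.List.pySetD ((List.range n).map f) (-(((n - k : Nat) : Int))) v
        = ((List.range n).map f).set (((List.range n).map f).length - (n - k)) v from by
      simp only [PySem.List.pySetD, PySem.List.pySet?, PySem.List.pyIdx?]
      rw [if_neg (by omega), if_pos (by simp only [List.length_map, List.length_range]; omega)]
      simp]
    rw [show ((List.range n).map f).length - (n - k) = k by simp only [List.length_map, List.length_range]; omega]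
    exact hset k hk

theorem minc {n : Nat} (f : Nat → Int) (e : Int) (k : Nat) (v : Int) (hk : k < n)
    (he : e = (k : Int) ∨ e = (k : Int) - n) :
    candyInc ((List.range n).map f) e v
      = (List.range n).map (fun j => if j = k then f k + v else f j) := by
  unfold candyInc
  rw [mget f e k hk he, mset f e k (f k + v) hk he]

theorem minc' {n : Nat} (f : Nat → Int) (e : Int) (k : Nat) (v : Int) (hk : k < n)
    (he : e = (k : Int) ∨ e = (k : Int) - n) :
    candyInc ((List.range n).map f) e v
      = (List.range n).map (fun j => f j + (if j = k then v else 0)) := by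
  rw [minc f e k v hk he]
  apply List.map_congr_left
  intro j hj
  by_cases h : j = k
  · subst h; simp
  · simp [h]

theorem q1_lt {n k : Nat} (hk : k < n) : q1 n k < n := by
  unfold q1; split_ifs <;> omega

theorem q2_lt {n k : Nat} (hk : k < n) : q2 n k < n := by
  unfold q2; split_ifs <;> omega

theorem q1_res {n k : Nat} (hk : k < n) :
    ((k : Int) - 1 = ((q1 n k : Nat) : Int)) ∨ ((k : Int) - 1 = ((q1 n k : Nat) : Int) - n) := by
  unfold q1
  split_ifs with h
  · right; omega
  · left; omega

theorem q2_mod {n k : Nat} (hk : k < n) :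
    PySem.Int.mod ((k : Int) + 1) (n : Int) = ((q2 n k : Nat) : Int) := by
  rw [show ((k : Int) + 1) = ((k + 1 : Nat) : Int) by push_cast; ring, PySem.Int.mod_natCast]
  unfold q2
  split_ifs with h
  · rw [show k + 1 = n by omega, Nat.mod_self]
  · rw [Nat.mod_eq_of_lt (by omega)]

theorem q1_mod {n k : Nat} (hk : k < n) :
    PySem.Int.mod ((k : Int) - 1) (n : Int) = ((q1 n k : Nat) : Int) := by
  by_cases h : k = 0
  · subst h
    have hn : (0:Int) < (n:Int) := by exact_mod_cast hk
    unfold q1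
    rw [if_pos rfl, PySem.Int.mod_eq_emod_of_pos hn,
        show ((0:Nat):Int) - 1 = ((n:Int) - 1) + (n:Int) * (-1) by push_cast; ring,
        Int.add_mul_emod_self_left, Int.emod_eq_of_lt (by omega) (by omega)]
    omega
  · rw [show (k : Int) - 1 = ((k - 1 : Nat) : Int) by omega, PySem.Int.mod_natCast]
    unfold q1
    rw [if_neg h, Nat.mod_eq_of_lt (by omega)]

theorem q1_eq_iff {n i j : Nat} (hi : i < n) (hj : j < n) : q1 n i = j ↔ i = q2 n j := by
  unfold q1 q2; split_ifs <;> omega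

theorem q2_eq_iff {n i j : Nat} (hi : i < n) (hj : j < n) : q2 n i = j ↔ i = q1 n j := by
  unfold q1 q2; split_ifs <;> omega

theorem sVal_succ (cand : List Int) (n k j : Nat) :
    sVal cand n (k + 1) j
      = sVal cand n k j
        + ((if q1 n k = j then gVal cand k else 0) + (if q2 n k = j then gVal cand k else 0)) := by
  unfold sVal; exact Finset.sum_range_succ _ k

theorem sVal_total (cand : List Int) {n j : Nat} (hj : j < n) :
    sVal cand n n j = gVal cand (q2 n j) + gVal cand (q1 n j) := by
  unfold sVal
  rw [Finset.sum_add_distrib]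
  have b1 : (∑ i ∈ Finset.range n, if q1 n i = j then gVal cand i else 0)
      = gVal cand (q2 n j) := by
    rw [Finset.sum_congr rfl
      (fun i hi => if_congr (q1_eq_iff (List.mem_range.mp (by simpa using hi)) hj) rfl rfl)]
    rw [Finset.sum_ite_eq' (Finset.range n) (q2 n j) (fun i => gVal cand i)]
    simp [Finset.mem_range.mpr (q2_lt hj)]
  have b2 : (∑ i ∈ Finset.range n, if q2 n i = j then gVal cand i else 0)
      = gVal cand (q1 n j) := by
    rw [Finset.sum_congr rfl
      (fun i hi => if_congr (q2_eq_iff (List.mem_range.mp (by simpa using hi)) hj) rfl rfl)]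
    rw [Finset.sum_ite_eq' (Finset.range n) (q1 n j) (fun i => gVal cand i)]
    simp [Finset.mem_range.mpr (q1_lt hj)]
  rw [b1, b2]

theorem stepA_char (f1 f2 : Nat → Int) {n k : Nat} (hk : k < n) :
    candyStepA (n : Int) ((List.range n).map f1, (List.range n).map f2) (k : Int)
      = ((List.range n).map
           (fun j => if j = k then f1 k - 2 * (if f1 k ≥ 2 then 1 else 0) else f1 j),
         (List.range n).map
           (fun j =>
             f2 j + (if j = q1 n k then (if f1 k ≥ 2 then (1 : Int) else 0) else 0)
                  + (if j = q2 n k then (if f1 k ≥ 2 then (1 : Int) else 0) else 0)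
                  + (if j = k then f1 k - 2 * (if f1 k ≥ 2 then 1 else 0) else 0))) := by
  unfold candyStepA
  dsimp only
  rw [mget f1 (k : Int) k hk (Or.inl rfl)]
  by_cases hC : f1 k ≥ 2
  · rw [if_pos hC, if_pos hC,
        mset f1 (k : Int) k (f1 k - 2) hk (Or.inl rfl),
        mget (fun j => if j = k then f1 k - 2 else f1 j) (k : Int) k hk (Or.inl rfl)]
    by_cases hL : k = n - 1
    · rw [if_pos (show (k : Int) = (n : Int) - 1 by omega),
          minc' f2 ((k : Int) - 1) (q1 n k) 1 (q1_lt hk) (q1_res hk),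
          minc' _ 0 (q2 n k) 1 (q2_lt hk) (Or.inl (by unfold q2; rw [if_pos hL]; rfl)),
          minc' _ (k : Int) k _ hk (Or.inl rfl)]
      refine Prod.ext ?_ ?_ <;> apply List.map_congr_left <;> intro j hj <;>
        split_ifs <;> omega
    · rw [if_neg (show ¬ (k : Int) = (n : Int) - 1 by omega),
          minc' f2 ((k : Int) - 1) (q1 n k) 1 (q1_lt hk) (q1_res hk),
          minc' _ ((k : Int) + 1) (q2 n k) 1 (q2_lt hk)
            (Or.inl (by unfold q2; rw [if_neg hL]; push_cast; ring)),
          minc' _ (k : Int) k _ hk (Or.inl rfl)]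
      refine Prod.ext ?_ ?_ <;> apply List.map_congr_left <;> intro j hj <;>
        split_ifs <;> omega
  · rw [if_neg hC, if_neg hC, minc' f2 (k : Int) k (f1 k) hk (Or.inl rfl)]
    refine Prod.ext ?_ ?_ <;> apply List.map_congr_left <;> intro j hj
    · by_cases h : j = k
      · subst h; simp
      · simp [h]
    · split_ifs <;> omega

theorem stateWInv (cand : List Int) (k : Nat) (hk : k ≤ cand.length) :
    (List.range k).foldl (fun s (i : Nat) => candyStepA cand.length s i)
      (cand, List.replicate cand.length 0)
    = ((List.range cand.length).map (fun j => if j < k then cRem cand j else cVal cand j),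
       (List.range cand.length).map
         (fun j => (if j < k then cRem cand j else 0) + sVal cand cand.length k j)) := by
  induction k with
  | zero =>
    simp only [List.range_zero, List.foldl_nil]
    refine Prod.ext ?_ ?_
    · rw [show (fun j => if j < 0 then cRem cand j else cVal cand j)
            = fun j => cand.getD j 0 from funext fun j => by simp [cVal]]
      exact (self_map cand).symm
    · simp only [Nat.not_lt_zero, if_false]
      rw [show (fun j => (0 : Int) + sVal cand cand.length 0 j)
            = fun _ => (0 : Int) from funext fun j => by simp [sVal]]
      simp
  | succ m ih =>
    rw [List.range_succ, List.foldl_append, ih (by omega), List.foldl_cons, List.foldl_nil,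
        stepA_char _ _ (show m < cand.length by omega)]
    refine Prod.ext ?_ ?_ <;> apply List.map_congr_left <;> intro j hj
    · by_cases h : j = m
      · subst h
        simp [cRem, gVal]
      · simp only [cRem, gVal]
        split_ifs <;> omega
    · rw [sVal_succ]
      by_cases h : j = m
      · subst h
        simp only [cRem, gVal, cVal]
        split_ifs <;> omega
      · simp only [cRem, gVal, cVal]
        split_ifs <;> omega

-- A's round, characterized pointwise
theorem roundA_char (cand : List Int) :
    candyRoundA cand = (List.range cand.length).map
      (fun j => cRem cand j + gVal cand (q2 cand.length j) + gVal cand (q1 cand.length j)) := by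
  unfold candyRoundA
  rw [PySem.List.pyRange_zero_natCast, List.foldl_map, stateWInv cand cand.length le_rfl]
  apply List.map_congr_left
  intro j hj
  simp only [List.mem_range] at hj
  rw [if_pos hj, sVal_total cand hj]
  ring

theorem length_roundA (cand : List Int) : (candyRoundA cand).length = cand.length := by
  rw [roundA_char]; simp

-- the worklist invariant: active is a nodup list holding exactly the indices with ≥2 candies
def WInv (cand active : List Int) : Prop :=
  active.Nodup ∧ ∀ a : Int, a ∈ active ↔ ∃ k : Nat, k < cand.length ∧ a = (k : Int) ∧ cVal cand k ≥ 2

theorem count_inv {cand active : List Int} (h : WInv cand active) {k : Nat} (hk : k < cand.length) :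
    active.count ((k : Nat) : Int) = if cVal cand k ≥ 2 then 1 else 0 := by
  by_cases hc : cVal cand k ≥ 2
  · rw [if_pos hc]
    exact_mod_cast List.count_eq_one_of_mem h.1 ((h.2 _).mpr ⟨k, hk, rfl, hc⟩)
  · rw [if_neg hc, List.count_eq_zero]
    intro hm
    obtain ⟨k', _, he, hc'⟩ := (h.2 _).mp hm
    exact hc (by rwa [show k = k' from by exact_mod_cast he])

theorem give_char {n : Nat} (as : List Int) (f : Nat → Int)
    (hb : ∀ a ∈ as, ∃ k : Nat, k < n ∧ a = (k : Int)) :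
    bGive ((List.range n).map f) as
      = (List.range n).map (fun j => f j - 2 * as.count ((j : Nat) : Int)) := by
  induction as generalizing f with
  | nil =>
    apply List.map_congr_left; intro j hj; simp
  | cons a as ih =>
    obtain ⟨k, hk, rfl⟩ := hb a (by simp)
    show bGive (PySem.List.pySetD _ _ _) as = _
    rw [mget f (k : Int) k hk (Or.inl rfl), mset f (k : Int) k (f k - 2) hk (Or.inl rfl),
        ih _ (fun a ha => hb a (by simp [ha]))]
    apply List.map_congr_left
    intro j hj
    simp only [List.mem_range] at hj
    rw [List.count_cons]
    by_cases h : j = k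
    · subst h
      rw [if_pos rfl]
      simp only [beq_self_eq_true, if_true]
      push_cast
      ring
    · rw [if_neg h, if_neg (show ¬ ((((k:Nat):Int) == ((j:Nat):Int)) = true) by simp; omega)]
      push_cast
      ring

theorem recv_char {n : Nat} (as : List Int) (f : Nat → Int)
    (hb : ∀ a ∈ as, ∃ k : Nat, k < n ∧ a = (k : Int)) :
    bRecv (n : Int) ((List.range n).map f) as
      = (List.range n).map (fun j => f j + as.count ((q2 n j : Nat) : Int)
                                         + as.count ((q1 n j : Nat) : Int)) := by
  induction as generalizing f with
  | nil =>
    apply List.map_congr_left; intro j hj; simp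
  | cons a as ih =>
    obtain ⟨k, hk, rfl⟩ := hb a (by simp)
    show bRecv _ (candyInc (candyInc _ _ _) _ _) as = _
    rw [q1_mod hk, q2_mod hk,
        minc' f ((q1 n k : Nat) : Int) (q1 n k) 1 (q1_lt hk) (Or.inl rfl),
        minc' _ ((q2 n k : Nat) : Int) (q2 n k) 1 (q2_lt hk) (Or.inl rfl),
        ih _ (fun a ha => hb a (by simp [ha]))]
    apply List.map_congr_left
    intro j hj
    simp only [List.mem_range] at hj
    rw [List.count_cons, List.count_cons]
    have hkq2 : (((k:Nat):Int) = ((q2 n j : Nat):Int)) ↔ j = q1 n k := by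
      rw [Nat.cast_inj]
      constructor
      · intro h
        exact ((q1_eq_iff hk hj).mpr h).symm
      · intro h
        exact (q1_eq_iff hk hj).mp h.symm
    have hkq1 : (((k:Nat):Int) = ((q1 n j : Nat):Int)) ↔ j = q2 n k := by
      rw [Nat.cast_inj]
      constructor
      · intro h
        exact ((q2_eq_iff hk hj).mpr h).symm
      · intro h
        exact (q2_eq_iff hk hj).mp h.symm
    simp only [beq_iff_eq, hkq2, hkq1]
    split_ifs <;> push_cast <;> ring

-- B's in-place round equals A's rebuilt round
theorem roundEq {cand active : List Int} (h : WInv cand active) :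
    bRecv (cand.length : Int) (bGive cand active) active = candyRoundA cand := by
  have hb : ∀ a ∈ active, ∃ k : Nat, k < cand.length ∧ a = (k : Int) := by
    intro a ha
    obtain ⟨k, hk, he, _⟩ := (h.2 _).mp ha
    exact ⟨k, hk, he⟩
  have h1 : bGive cand active
      = (List.range cand.length).map
          (fun j => cand.getD j 0 - 2 * (active.count ((j : Nat) : Int) : Int)) := by
    conv_lhs => rw [show cand = (List.range cand.length).map (fun j => cand.getD j 0) from (self_map cand).symm]
    exact give_char active _ hb
  have h2 : bRecv (cand.length : Int) (bGive cand active) active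
      = (List.range cand.length).map
          (fun j => cand.getD j 0 - 2 * (active.count ((j : Nat) : Int) : Int)
            + (active.count ((q2 cand.length j : Nat) : Int) : Int)
            + (active.count ((q1 cand.length j : Nat) : Int) : Int)) := by
    rw [h1]
    exact recv_char active _ hb
  rw [h2, roundA_char]
  apply List.map_congr_left
  intro j hj
  simp only [List.mem_range] at hj
  rw [count_inv h hj, count_inv h (q2_lt hj), count_inv h (q1_lt hj)]
  simp only [cRem, gVal, cVal]
  split_ifs <;> push_cast <;> ring

theorem touched_fold_mem (n : Int) (as : List Int) (t : List Int) (a : Int) :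
    a ∈ as.foldl (fun t i =>
        PySem.Set.add (PySem.Set.add (PySem.Set.add t i) (PySem.Int.mod (i - 1) n))
          (PySem.Int.mod (i + 1) n)) t
      ↔ a ∈ t ∨ ∃ i ∈ as, a = i ∨ a = PySem.Int.mod (i - 1) n ∨ a = PySem.Int.mod (i + 1) n := by
  induction as generalizing t with
  | nil => simp
  | cons x as ih =>
    rw [List.foldl_cons, ih]
    simp only [PySem.Set.mem_add, List.mem_cons]
    aesop

-- membership in B's touched set, via the q-neighbours
theorem touched_mem {cand active : List Int} (h : WInv cand active) (a : Int) :
    a ∈ bTouched (cand.length : Int) active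
      ↔ ∃ m : Nat, m < cand.length ∧ a = (m : Int) ∧
          (cVal cand m ≥ 2 ∨ cVal cand (q2 cand.length m) ≥ 2 ∨ cVal cand (q1 cand.length m) ≥ 2) := by
  unfold bTouched
  rw [touched_fold_mem]
  simp only [PySem.Set.empty, List.not_mem_nil, false_or]
  constructor
  · rintro ⟨i, hi, hcase⟩
    obtain ⟨k, hk, rfl, hc⟩ := (h.2 _).mp hi
    rcases hcase with rfl | rfl | rfl
    · exact ⟨k, hk, rfl, Or.inl hc⟩
    · refine ⟨q1 cand.length k, q1_lt hk, q1_mod hk, Or.inr (Or.inl ?_)⟩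
      rwa [← (q1_eq_iff hk (q1_lt hk)).mp rfl]
    · refine ⟨q2 cand.length k, q2_lt hk, q2_mod hk, Or.inr (Or.inr ?_)⟩
      rwa [← (q2_eq_iff hk (q2_lt hk)).mp rfl]
  · rintro ⟨m, hm, rfl, hc | hc | hc⟩
    · exact ⟨(m : Int), (h.2 _).mpr ⟨m, hm, rfl, hc⟩, Or.inl rfl⟩
    · refine ⟨((q2 cand.length m : Nat) : Int), (h.2 _).mpr ⟨_, q2_lt hm, rfl, hc⟩,
        Or.inr (Or.inl ?_)⟩
      rw [q1_mod (q2_lt hm)]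
      exact_mod_cast congrArg (fun j => ((j : Nat) : Int))
        ((q1_eq_iff (q2_lt hm) hm).mpr rfl).symm
    · refine ⟨((q1 cand.length m : Nat) : Int), (h.2 _).mpr ⟨_, q1_lt hm, rfl, hc⟩,
        Or.inr (Or.inr ?_)⟩
      rw [q2_mod (q1_lt hm)]
      exact_mod_cast congrArg (fun j => ((j : Nat) : Int))
        ((q2_eq_iff (q1_lt hm) hm).mpr rfl).symm

-- the invariant is preserved across a round
theorem inv_next {cand active : List Int} (h : WInv cand active) :
    WInv (candyRoundA cand)
      (PySem.Set.ofList ((bTouched (cand.length : Int) active).filter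
        (fun j => decide (PySem.List.pyGetD (candyRoundA cand) j 0 ≥ 2)))) := by
  constructor
  · exact PySem.Set.nodup_ofList _
  · intro a
    rw [PySem.Set.mem_ofList, List.mem_filter, touched_mem h, decide_eq_true_iff]
    have hv : ∀ m : Nat, m < cand.length →
        PySem.List.pyGetD (candyRoundA cand) ((m : Nat) : Int) 0 = cVal (candyRoundA cand) m := by
      intro m hm
      rw [PySem.List.pyGetD_natCast]
      rfl
    constructor
    · rintro ⟨⟨m, hm, rfl, _⟩, hge⟩
      refine ⟨m, by rw [length_roundA]; exact hm, rfl, ?_⟩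
      rwa [← hv m hm]
    · rintro ⟨m, hm, rfl, hge⟩
      rw [length_roundA] at hm
      have hval : cVal (candyRoundA cand) m
          = cRem cand m + gVal cand (q2 cand.length m) + gVal cand (q1 cand.length m) := by
        rw [roundA_char]
        exact PySem.List.getD_map_range _ _ m 0 hm
      refine ⟨⟨m, hm, rfl, ?_⟩, by rwa [hv m hm]⟩
      by_contra hno
      push_neg at hno
      obtain ⟨h0, h2, h1⟩ := hno
      rw [hval] at hge
      simp only [cRem, gVal] at hge
      rw [if_neg (by omega), if_neg (by omega), if_neg (by omega)] at hge
      omega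

theorem stop_iff (l : List Int) : candyStop l = true ↔ ∀ x ∈ l, ¬ x ≥ 2 := by
  induction l with
  | nil => simp [candyStop]
  | cons x xs ih =>
    by_cases h : x ≥ 2
    · rw [show candyStop (x :: xs) = false from by simp [candyStop, if_pos h]]
      simp only [Bool.false_eq_true, false_iff]
      push_neg
      exact ⟨x, List.mem_cons_self, h⟩
    · rw [show candyStop (x :: xs) = candyStop xs from by simp [candyStop, if_neg h], ih]
      constructor
      · intro hall y hy
        rcases List.mem_cons.mp hy with rfl | hy
        · exact h
        · exact hall y hy
      · intro hall y hy
        exact hall y (List.mem_cons_of_mem _ hy)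

theorem stop_empty {cand active : List Int} (h : WInv cand active) :
    candyStop cand = active.isEmpty := by
  by_cases hs : active.isEmpty
  · have hnil : active = [] := List.isEmpty_iff.mp hs
    rw [hs, stop_iff]
    intro x hx hge
    obtain ⟨k, hk, rfl⟩ := List.mem_iff_getElem.mp hx
    have hmem : ((k : Nat) : Int) ∈ active := (h.2 _).mpr ⟨k, hk, rfl, by
      simpa [cVal, List.getD_eq_getElem?_getD, List.getElem?_eq_getElem hk] using hge⟩
    simp [hnil] at hmem
  · have hne : ∃ a, a ∈ active := by
      cases active with
      | nil => simp at hs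
      | cons y ys => exact ⟨y, List.mem_cons_self⟩
    obtain ⟨a, ha⟩ := hne
    obtain ⟨k, hk, rfl, hc⟩ := (h.2 a).mp ha
    have hnot : ¬ (candyStop cand = true) := by
      rw [stop_iff]
      push_neg
      refine ⟨cVal cand k, ?_, hc⟩
      simp only [cVal, List.getD_eq_getElem?_getD, List.getElem?_eq_getElem hk, Option.getD_some]
      exact List.getElem_mem hk
    rw [Bool.eq_false_iff.mpr hnot, Bool.eq_false_iff.mpr hs]

theorem init_inv (cand : List Int) : WInv cand (bInitActive cand (cand.length : Int)) := by
  constructor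
  · exact PySem.Set.nodup_ofList _
  · intro a
    unfold bInitActive
    rw [PySem.Set.mem_ofList, List.mem_filter, PySem.List.mem_pyRange_one, decide_eq_true_iff]
    constructor
    · rintro ⟨⟨h0, hlt⟩, hge⟩
      refine ⟨a.toNat, by omega, by omega, ?_⟩
      rw [show a = ((a.toNat : Nat) : Int) by omega, PySem.List.pyGetD_natCast] at hge
      exact hge
    · rintro ⟨k, hk, rfl, hge⟩
      refine ⟨⟨by omega, by exact_mod_cast hk⟩, ?_⟩
      rwa [PySem.List.pyGetD_natCast]

-- the two loops agree under the invariant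
theorem loop_eq (fuel : Nat) : ∀ (cand active : List Int) (r : Int), WInv cand active →
    candyLoopA fuel cand r = bLoop (cand.length : Int) fuel cand active r := by
  induction fuel with
  | zero => intro cand active r _; rfl
  | succ f ih =>
    intro cand active r h
    show (if candyStop cand then r else candyLoopA f (candyRoundA cand) (r + 1)) = _
    rw [stop_empty h]
    by_cases he : active.isEmpty
    · rw [if_pos he]
      show _ = (if active.isEmpty then r else _)
      rw [if_pos he]
    · rw [if_neg he]
      show candyLoopA f (candyRoundA cand) (r + 1)
        = (if active.isEmpty then r
           else bLoop (cand.length : Int) f (bRecv (cand.length : Int) (bGive cand active) active)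
             (PySem.Set.ofList ((bTouched (cand.length : Int) active).filter
               (fun j => decide (PySem.List.pyGetD
                 (bRecv (cand.length : Int) (bGive cand active) active) j 0 ≥ 2)))) (r + 1))
      rw [if_neg he, roundEq h]
      have hlen : (((candyRoundA cand).length : Nat) : Int) = ((cand.length : Nat) : Int) := by
        rw [length_roundA]
      rw [← hlen]
      refine ih _ _ _ ?_
      rw [hlen]
      exact inv_next h

-- ===== VERDICT (by name: the statement is the Claim_ definition above) =====
theorem candy_share_spec : Claim_equal_candy_share := by
  intro candies _
  show candy_share candies = candy_share_alt candies
  exact loop_eq (candyFuel candies) candies _ 0 (init_inv candies)
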